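-- pv_equiv track=rewrite | github.com/Sneha-Mathai64/quest_python | DAY 5/E1.py | max_earnings
-- ===== SOURCE A (Python) =====
-- def max_earnings(price_of_shoes, p):
--     negative_prices = []
--
--     # iterate  through each price and collect negative prices
--     for price in price_of_shoes:
--         if price < 0:
--             negative_prices.append(price)
--
--     # Sort negative prices in ascending order (most negative price comes first)
--     negative_prices.sort()
--
--     # Take highest negative prices,list slicing
--     selected_prices = negative_prices[:p]
--
--     # To calculate the total earning
--     total_earnings = -sum(selected_prices)  # Convert negative sum to positive (earnings will be positive)
--
--     return total_earnings
-- ===== SOURCE B (Python) =====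
-- def _sum_smallest(xs, k):
--     # Sum of the k smallest elements of xs (all of xs if k >= len(xs), 0 if k <= 0),
--     # by quickselect-style pivot partitioning -- no sorting.
--     if k <= 0 or not xs:
--         return 0
--     if k >= len(xs):
--         return sum(xs)
--     pivot = xs[len(xs) // 2]
--     lo = [x for x in xs if x < pivot]
--     hi = [x for x in xs if x > pivot]
--     n_eq = len(xs) - len(lo) - len(hi)
--     if k <= len(lo):
--         return _sum_smallest(lo, k)
--     if k <= len(lo) + n_eq:
--         return sum(lo) + pivot * (k - len(lo))
--     return sum(lo) + pivot * n_eq + _sum_smallest(hi, k - len(lo) - n_eq)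
--
-- def max_earnings(price_of_shoes, p):
--     negatives = [x for x in price_of_shoes if x < 0]
--     return -_sum_smallest(negatives, p)
-- ===== Notes on version B (the rewrite author's own statement) =====
-- stated objective: alternative
-- what changed: B replaces filter+full sort+slice by a quickselect-style divide-and-conquer that partitions around a pivot and sums the p smallest negatives directly, never sorting.
-- intended difference: For p < 0 with more than -p negative prices, A's slice negative_prices[:p] wraps around and returns the (positive) sum of all but the last -p negatives; B returns 0, the intended earnings for a non-positive number of shoes. — e.g. on max_earnings([-1, -2], -1): A returns 2, B returns 0
import Mathlib
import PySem

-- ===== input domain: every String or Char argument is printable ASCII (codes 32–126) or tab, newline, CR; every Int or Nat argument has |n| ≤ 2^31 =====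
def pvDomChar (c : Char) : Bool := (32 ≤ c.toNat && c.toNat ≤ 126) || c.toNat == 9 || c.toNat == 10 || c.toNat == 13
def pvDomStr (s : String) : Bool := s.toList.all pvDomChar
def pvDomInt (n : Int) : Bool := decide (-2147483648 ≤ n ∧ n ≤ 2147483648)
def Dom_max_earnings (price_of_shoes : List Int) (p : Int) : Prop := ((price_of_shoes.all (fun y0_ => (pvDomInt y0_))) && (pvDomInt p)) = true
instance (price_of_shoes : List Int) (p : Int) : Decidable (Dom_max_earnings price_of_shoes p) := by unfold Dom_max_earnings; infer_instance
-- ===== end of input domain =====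

-- B sums the p most negative prices by quickselect-style pivot partitioning instead of
-- filter+sort+slice; A and B agree except where D_max_earnings states the intended difference.

-- ===== PORT A =====
def max_earnings (price_of_shoes : List Int) (p : Int) : Int :=
  let negative_prices := price_of_shoes.foldl (fun acc price => if price < 0 then acc ++ [price] else acc) []
  let sorted_prices := PySem.List.sorted negative_prices (fun x => x) false
  let selected_prices := PySem.List.slice sorted_prices none (some p)
  let total_earnings := -(selected_prices.sum)
  total_earnings

-- ===== PORT B =====
-- helper needed by the port's termination proof
lemma getD_mid_mem (xs : List Int) (h : xs ≠ []) : xs.getD (xs.length/2) 0 ∈ xs := by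
  have hl : xs.length / 2 < xs.length := Nat.div_lt_self (List.length_pos_iff.2 h) one_lt_two
  simp [List.getD, List.getElem?_eq_getElem hl]

-- sum of the k smallest elements of xs by pivot partitioning (transliteration of _sum_smallest)
def sumSmallest (xs : List Int) (k : Int) : Int :=
  if k ≤ 0 ∨ xs = [] then 0
  else if (xs.length : Int) ≤ k then xs.sum
  else
    let pivot := xs.getD (xs.length / 2) 0
    let lo := xs.filter (fun x => x < pivot)
    let hi := xs.filter (fun x => pivot < x)
    let nEq : Nat := xs.length - lo.length - hi.length
    if k ≤ (lo.length : Int) then sumSmallest lo k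
    else if k ≤ (lo.length : Int) + (nEq : Int) then lo.sum + pivot * (k - lo.length)
    else lo.sum + pivot * (nEq : Int) + sumSmallest hi (k - lo.length - nEq)
termination_by xs.length
decreasing_by
  all_goals
    have hne : xs ≠ [] := by rename_i h1 h2; tauto
    rw [List.length_unattach]
    refine lt_of_lt_of_eq (List.length_filter_lt_length_iff_exists.2
      ⟨⟨xs.getD (xs.length/2) 0, getD_mid_mem xs hne⟩, List.mem_attach _ _, by simp⟩) List.length_attach

def max_earnings_alt (price_of_shoes : List Int) (p : Int) : Int :=
  -(sumSmallest (price_of_shoes.filter (fun x => x < 0)) p)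

-- ===== PRECONDITION & SPEC =====
-- For p < 0 with more than -p negative prices, A's slice negative_prices[:p] wraps around and
-- returns the (positive) sum of all but the last -p negatives; B returns 0, the intended
-- earnings for a non-positive number of shoes.
def D_max_earnings (price_of_shoes : List Int) (p : Int) : Prop :=
  p < 0 ∧ 1 ≤ ((price_of_shoes.filter (fun x => x < 0)).length : Int) + p
instance (price_of_shoes : List Int) (p : Int) : Decidable (D_max_earnings price_of_shoes p) := by
  unfold D_max_earnings; infer_instance

def Spec_max_earnings (price_of_shoes : List Int) (p : Int) (out : Int) : Prop :=
  ¬ D_max_earnings price_of_shoes p → out = max_earnings_alt price_of_shoes p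
instance (price_of_shoes : List Int) (p : Int) (out : Int) : Decidable (Spec_max_earnings price_of_shoes p out) := by
  unfold Spec_max_earnings; infer_instance

def pvDiffWitness_max_earnings : List Int × Int := ([-1, -2], -1)
def pvDiffWitnessOut_max_earnings : Int × Int := (2, 0)

-- ===== CLAIM =====
def Claim_unchanged_max_earnings : Prop := ∀ (price_of_shoes : List Int) (p : Int), Dom_max_earnings price_of_shoes p → Spec_max_earnings price_of_shoes p (max_earnings price_of_shoes p)
def Claim_changed_max_earnings : Prop := Dom_max_earnings (pvDiffWitness_max_earnings.1) (pvDiffWitness_max_earnings.2) ∧ D_max_earnings (pvDiffWitness_max_earnings.1) (pvDiffWitness_max_earnings.2) ∧ max_earnings (pvDiffWitness_max_earnings.1) (pvDiffWitness_max_earnings.2) = pvDiffWitnessOut_max_earnings.1 ∧ max_earnings_alt (pvDiffWitness_max_earnings.1) (pvDiffWitness_max_earnings.2) = pvDiffWitnessOut_max_earnings.2 ∧ pvDiffWitnessOut_max_earnings.1 ≠ pvDiffWitnessOut_max_earnings.2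
def Claim_exact_max_earnings : Prop := ∀ (price_of_shoes : List Int) (p : Int), Dom_max_earnings price_of_shoes p → D_max_earnings price_of_shoes p → max_earnings price_of_shoes p ≠ max_earnings_alt price_of_shoes p

-- ===== LEMMAS AND PROOFS =====

lemma sorted_partition (xs : List Int) (pivot : Int) :
    PySem.List.sorted xs (fun x => x) false =
      PySem.List.sorted (xs.filter (fun x => x < pivot)) (fun x => x) false
      ++ List.replicate (xs.length - (xs.filter (fun x => x < pivot)).length
            - (xs.filter (fun x => pivot < x)).length) pivot
      ++ PySem.List.sorted (xs.filter (fun x => pivot < x)) (fun x => x) false := by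
  set lo := xs.filter (fun x => x < pivot) with hlo
  set hi := xs.filter (fun x => pivot < x) with hhi
  set eqs := xs.filter (fun x => x = pivot) with heqs
  have h1 := List.filter_append_perm (fun x => decide (x < pivot)) xs
  have h2 := List.filter_append_perm (fun x => decide (x = pivot))
      (xs.filter (fun x => !decide (x < pivot)))
  have e1 : (xs.filter (fun x => !decide (x < pivot))).filter (fun x => decide (x = pivot)) = eqs := by
    rw [List.filter_filter, heqs]
    apply List.filter_congr
    intro x hx
    by_cases h : x = pivot <;> simp [h]
  have e2 : (xs.filter (fun x => !decide (x < pivot))).filter (fun x => !decide (x = pivot)) = hi := by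
    rw [List.filter_filter, hhi]
    apply List.filter_congr
    intro x hx
    by_cases h : pivot < x <;> by_cases h2 : x = pivot <;> simp [h, h2] <;> omega
  rw [e1, e2] at h2
  have hperm : (lo ++ (eqs ++ hi)).Perm xs := (List.Perm.append_left lo h2).trans h1
  have hlen : eqs.length = xs.length - lo.length - hi.length := by
    have := hperm.length_eq
    simp only [List.length_append] at this
    omega
  have hrep : eqs = List.replicate (xs.length - lo.length - hi.length) pivot := by
    rw [← hlen]
    apply List.eq_replicate_of_mem
    intro b hb
    have := List.of_mem_filter hb
    simpa using this
  apply PySem.List.sorted_id_eq_of_perm_of_pairwise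
  · have prep : (List.replicate (xs.length - lo.length - hi.length) pivot).Perm eqs := by rw [hrep]
    have p1 : (PySem.List.sorted lo (fun x => x) false
          ++ (List.replicate (xs.length - lo.length - hi.length) pivot
          ++ PySem.List.sorted hi (fun x => x) false)).Perm (lo ++ (eqs ++ hi)) :=
      List.Perm.append (PySem.List.sorted_perm _ _ _)
        (List.Perm.append prep (PySem.List.sorted_perm _ _ _))
    rw [List.append_assoc]
    exact p1.trans hperm
  · rw [List.append_assoc]
    refine List.pairwise_append.2 ⟨?_, List.pairwise_append.2 ⟨?_, ?_, ?_⟩, ?_⟩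
    · exact PySem.List.sorted_pairwise _ _
    · exact List.pairwise_replicate.2 (Or.inr le_rfl)
    · exact PySem.List.sorted_pairwise _ _
    · intro a ha b hb
      have ha' := List.eq_of_mem_replicate ha
      have hb' : pivot < b := by
        have := (PySem.List.mem_sorted _ _ _ _).1 hb
        simpa using List.of_mem_filter this
      omega
    · intro a ha b hb
      have ha' : a < pivot := by
        have := (PySem.List.mem_sorted _ _ _ _).1 ha
        simpa using List.of_mem_filter this
      rcases List.mem_append.1 hb with hb | hb
      · have := List.eq_of_mem_replicate hb; omega
      · have : pivot < b := by
          have := (PySem.List.mem_sorted _ _ _ _).1 hb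
          simpa using List.of_mem_filter this
        omega

lemma filter_lt_pivot_length (xs : List Int) (hne : xs ≠ []) :
    (xs.filter (fun x => decide (x < xs.getD (xs.length / 2) 0))).length < xs.length :=
  List.length_filter_lt_length_iff_exists.2 ⟨_, getD_mid_mem xs hne, by simp⟩

lemma filter_gt_pivot_length (xs : List Int) (hne : xs ≠ []) :
    (xs.filter (fun x => decide (xs.getD (xs.length / 2) 0 < x))).length < xs.length :=
  List.length_filter_lt_length_iff_exists.2 ⟨_, getD_mid_mem xs hne, by simp⟩

lemma sumSmallest_eq : ∀ (n : Nat) (xs : List Int), xs.length ≤ n → ∀ (k : Int),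
    sumSmallest xs k = ((PySem.List.sorted xs (fun x => x) false).take k.toNat).sum := by
  intro n
  induction n with
  | zero =>
    intro xs hlen k
    have hx : xs = [] := by cases xs <;> simp_all
    subst hx
    rw [sumSmallest]
    simp [PySem.List.sorted]
  | succ n ihn =>
    intro xs hlen k
    rw [sumSmallest]
    split_ifs with hA hB
    · rcases hA with h | h
      · have : k.toNat = 0 := by omega
        simp [this]
      · subst h; simp [PySem.List.sorted]
    · have hlen2 : (PySem.List.sorted xs (fun x => x) false).length = xs.length :=
        PySem.List.length_sorted _ _ _
      rw [List.take_of_length_le (by omega)]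
      exact ((PySem.List.sorted_perm _ _ _).sum_eq).symm
    · have hne : xs ≠ [] := by tauto
      have hk0 : 0 < k := by omega
      set pivot := xs.getD (xs.length / 2) 0 with hpiv
      set lo := List.filter (fun x => decide (x < pivot)) xs with hlo
      set hi := List.filter (fun x => decide (pivot < x)) xs with hhi
      have hlolt : lo.length < xs.length := filter_lt_pivot_length xs hne
      have hhilt : hi.length < xs.length := filter_gt_pivot_length xs hne
      show (if k ≤ (lo.length : Int) then sumSmallest lo k
        else if k ≤ (lo.length : Int) + ((xs.length - lo.length - hi.length : Nat) : Int)
          then lo.sum + pivot * (k - lo.length)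
        else lo.sum + pivot * ((xs.length - lo.length - hi.length : Nat) : Int)
          + sumSmallest hi (k - lo.length - ((xs.length - lo.length - hi.length : Nat) : Int)))
        = (List.take k.toNat (PySem.List.sorted xs (fun x => x) false)).sum
      have hpart := sorted_partition xs pivot
      rw [← hlo, ← hhi] at hpart
      have hSLlen : (PySem.List.sorted lo (fun x => x) false).length = lo.length :=
        PySem.List.length_sorted _ _ _
      have hSHlen : (PySem.List.sorted hi (fun x => x) false).length = hi.length :=
        PySem.List.length_sorted _ _ _
      rw [hpart]
      split_ifs with hC hD
      · -- k ≤ lo.length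
        rw [ihn lo (by omega) k]
        rw [List.append_assoc, List.take_append_of_le_length (by rw [hSLlen]; omega)]
      · -- lo.length < k ≤ lo.length + nEq
        rw [List.append_assoc, List.take_append,
          List.take_of_length_le (by rw [hSLlen]; omega), List.take_append, List.take_replicate]
        have h0 : k.toNat - (PySem.List.sorted lo (fun x => x) false).length
            - (List.replicate (xs.length - lo.length - hi.length) pivot).length = 0 := by
          rw [hSLlen, List.length_replicate]; omega
        have hmin : min (k.toNat - (PySem.List.sorted lo (fun x => x) false).length)
            (xs.length - lo.length - hi.length) = k.toNat - lo.length := by rw [hSLlen]; omega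
        rw [h0, List.take_zero, hmin]
        simp only [List.append_nil, List.sum_append, List.sum_replicate, nsmul_eq_mul]
        have hsum : (PySem.List.sorted lo (fun x => x) false).sum = lo.sum :=
          (PySem.List.sorted_perm _ _ _).sum_eq
        rw [hsum]
        have hcast : ((k.toNat - lo.length : Nat) : Int) = k - lo.length := by omega
        rw [hcast]
        ring
      · -- lo.length + nEq < k < xs.length
        rw [List.append_assoc, List.take_append,
          List.take_of_length_le (by rw [hSLlen]; omega), List.take_append, List.take_replicate]
        have hmin : min (k.toNat - (PySem.List.sorted lo (fun x => x) false).length)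
            (xs.length - lo.length - hi.length) = xs.length - lo.length - hi.length := by
          rw [hSLlen]; omega
        have harg : k.toNat - (PySem.List.sorted lo (fun x => x) false).length
            - (List.replicate (xs.length - lo.length - hi.length) pivot).length
            = (k - ↑lo.length - ((xs.length - lo.length - hi.length : Nat) : Int)).toNat := by
          rw [hSLlen, List.length_replicate]; omega
        rw [hmin, harg]
        simp only [List.sum_append, List.sum_replicate, nsmul_eq_mul]
        have hsum : (PySem.List.sorted lo (fun x => x) false).sum = lo.sum :=
          (PySem.List.sorted_perm _ _ _).sum_eq
        rw [hsum, ← ihn hi (by omega) _]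
        ring

lemma sum_neg_of_all_neg (l : List Int) (hne : l ≠ []) (h : ∀ x ∈ l, x < 0) : l.sum < 0 := by
  induction l with
  | nil => simp at hne
  | cons a t ih =>
    rcases t with _ | ⟨b, t⟩
    · simpa using h a (by simp)
    · have h1 := ih (by simp) (fun x hx => h x (by simp at hx ⊢; tauto))
      have h2 := h a (by simp)
      simp only [List.sum_cons] at *
      omega

lemma A_closed (price_of_shoes : List Int) (p : Int) :
    max_earnings price_of_shoes p =
      -((PySem.List.slice (PySem.List.sorted (price_of_shoes.filter (fun x => x < 0)) (fun x => x) false)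
          none (some p)).sum) := by
  unfold max_earnings
  rw [PySem.List.foldl_append_ite_eq_filter]
  simp

lemma B_closed (price_of_shoes : List Int) (p : Int) :
    max_earnings_alt price_of_shoes p =
      -(((PySem.List.sorted (price_of_shoes.filter (fun x => x < 0)) (fun x => x) false).take p.toNat).sum) := by
  unfold max_earnings_alt
  rw [sumSmallest_eq (price_of_shoes.filter (fun x => x < 0)).length _ le_rfl]

-- ===== VERDICT =====
theorem max_earnings_spec : Claim_unchanged_max_earnings := by
  intro price_of_shoes p _ hnD
  rw [A_closed, B_closed]
  by_cases hp : 0 ≤ p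
  · rw [PySem.List.slice_to _ hp]
  · have hp' : p < 0 := by omega
    have hlen : ((price_of_shoes.filter (fun x => x < 0)).length : Int) + p ≤ 0 := by
      unfold D_max_earnings at hnD
      push Not at hnD
      have := hnD hp'
      omega
    have hk : 0 < (-p).toNat := by omega
    have hpe : (some p : Option Int) = some (-(((-p).toNat : Nat) : Int)) := by
      congr 1; omega
    rw [hpe, PySem.List.slice_to_neg_natCast _ _ hk]
    have h1 : (PySem.List.sorted (price_of_shoes.filter (fun x => x < 0)) (fun x => x) false).length
        - (-p).toNat = 0 := by
      rw [PySem.List.length_sorted]; omega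
    have h2 : p.toNat = 0 := by omega
    rw [h1, h2]

theorem max_earnings_changed : Claim_changed_max_earnings := by
  unfold Claim_changed_max_earnings
  refine ⟨by decide, by decide, by decide, ?_, by decide⟩
  show max_earnings_alt [-1, -2] (-1) = 0
  rw [max_earnings_alt, sumSmallest]
  norm_num

theorem max_earnings_tight : Claim_exact_max_earnings := by
  intro price_of_shoes p _ hD
  obtain ⟨hp, hlen⟩ := hD
  rw [A_closed, B_closed]
  have h2 : p.toNat = 0 := by omega
  rw [h2]
  simp only [List.take_zero, List.sum_nil, neg_zero]
  have hk : 0 < (-p).toNat := by omega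
  have hpe : (some p : Option Int) = some (-(((-p).toNat : Nat) : Int)) := by
    congr 1; omega
  rw [hpe, PySem.List.slice_to_neg_natCast _ _ hk]
  set S := PySem.List.sorted (price_of_shoes.filter (fun x => x < 0)) (fun x => x) false with hS
  have hSlen : S.length = (price_of_shoes.filter (fun x => x < 0)).length :=
    PySem.List.length_sorted _ _ _
  have htne : S.take (S.length - (-p).toNat) ≠ [] := by
    have : (S.take (S.length - (-p).toNat)).length = S.length - (-p).toNat := by
      rw [List.length_take]; omega
    intro hcon
    rw [hcon] at this
    simp at this
    omega
  have hmem : ∀ x ∈ S.take (S.length - (-p).toNat), x < 0 := by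
    intro x hx
    have hx1 : x ∈ S := List.mem_of_mem_take hx
    have hx2 : x ∈ price_of_shoes.filter (fun x => x < 0) :=
      (PySem.List.mem_sorted _ _ _ _).1 hx1
    simpa using List.of_mem_filter hx2
  have := sum_neg_of_all_neg _ htne hmem
  omega
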